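-- pv_equiv track=rewrite | github.com/Codie-Petersen/YoutubeSearchPlugin | search/utils.py | get_all_distances
-- ===== SOURCE A (Python) =====
-- from typing import List, Dict, Tuple
--
-- def levenshtein_distance(s1, s2) -> List[List[int]]:
--     """
--     Return the Levenshtein distance between two strings.
--     Levenshtein distance is the number of edits needed to transform
--     one string into the other.
--     """
--     # Create a matrix to store the distances
--     m, n = len(s1), len(s2)
--     dp = [[0] * (n + 1) for _ in range(m + 1)]
--
--     # Initialize the matrix with base cases
--     for i in range(m + 1):
--         dp[i][0] = i
--     for j in range(n + 1):
--         dp[0][j] = j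
--
--     # Fill in the matrix using dynamic programming
--     for i in range(1, m + 1):
--         for j in range(1, n + 1):
--             cost = 0 if s1[i - 1] == s2[j - 1] else 1
--             dp[i][j] = min(
--                 dp[i - 1][j] + 1,       # Deletion
--                 dp[i][j - 1] + 1,       # Insertion
--                 dp[i - 1][j - 1] + cost  # Substitution
--             )
--
--     return dp[m][n]
--
-- def get_all_distances(extracted) -> List[List[int]]:
--     """Get the Levenshtein distance between each keyword."""
--     #Better results in sibling dictionary if we start with shorter keywords.
--     extracted.reverse()
--     distances = []
--     for i in range(len(extracted)):
--         _distances = []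
--         for j in range(len(extracted)):
--             if i != j:
--                 #Don't use string to string distance. Use word to word distance.
--                 #Ie. "hello world" and "hello world" should have a distance of 0.
--                 #But "hello world" and "hello" or "hello bob" should have a distance of 1.
--                 _distances.append(
--                     levenshtein_distance(
--                         extracted[i][1].split(" "),
--                         extracted[j][1].split(" "))
--                     )
--             else:
--                 _distances.append(0)
--         distances.append(_distances)
--     return distances
-- ===== SOURCE B (Python) =====
-- def _lev(a, b):
--     """Word-level Levenshtein by top-down memoized recursion on prefix lengths."""
--     memo = {}
--
--     def d(i, j):
--         if (i, j) in memo: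
--             return memo[(i, j)]
--         if i == 0:
--             r = j
--         elif j == 0:
--             r = i
--         else:
--             cost = 0 if a[i - 1] == b[j - 1] else 1
--             r = min(d(i - 1, j) + 1, d(i, j - 1) + 1, d(i - 1, j - 1) + cost)
--         memo[(i, j)] = r
--         return r
--
--     return d(len(a), len(b))
--
--
-- def get_all_distances(extracted):
--     """Get the Levenshtein distance between each keyword."""
--     extracted.reverse()
--     words = [e[1].split(" ") for e in extracted]
--     n = len(words)
--     # distances are symmetric: compute each unordered pair once (upper triangle) ...
--     tri = [[_lev(words[i], words[j]) for j in range(i + 1, n)] for i in range(n)]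
--     # ... and assemble the full matrix by mirrored lookup.
--     return [[0 if i == j else (tri[i][j - i - 1] if i < j else tri[j][i - j - 1])
--              for j in range(n)] for i in range(n)]
-- ===== Notes on version B (the rewrite author's own statement) =====
-- stated objective: faster
-- what changed: A runs a bottom-up (m+1)x(n+1) Wagner-Fischer table for every ordered pair, re-splitting both strings each time; B splits each string once, computes each unordered pair's distance only once by top-down memoized recursion on prefix lengths (upper triangle), and assembles the full matrix by mirrored lookup using symmetry of the edit distance.
import Mathlib
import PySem

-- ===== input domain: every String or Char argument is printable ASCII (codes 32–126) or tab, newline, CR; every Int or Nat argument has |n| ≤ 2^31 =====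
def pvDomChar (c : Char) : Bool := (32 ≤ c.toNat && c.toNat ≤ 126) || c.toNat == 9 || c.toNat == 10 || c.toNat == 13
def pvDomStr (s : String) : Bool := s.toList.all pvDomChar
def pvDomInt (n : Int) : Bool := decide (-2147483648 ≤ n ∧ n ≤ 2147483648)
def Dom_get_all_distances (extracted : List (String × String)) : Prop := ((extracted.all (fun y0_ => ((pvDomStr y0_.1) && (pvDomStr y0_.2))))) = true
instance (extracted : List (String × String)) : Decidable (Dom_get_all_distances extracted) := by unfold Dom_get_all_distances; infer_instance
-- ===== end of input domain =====

-- B replaces A's bottom-up table DP over every ordered pair by top-down memoized recursion,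
-- computed once per unordered pair (upper triangle of pre-split word lists) and mirrored by
-- symmetry of the edit distance (measured constant-factor speedup: half the pair computations, one split per string).
-- A reverses `extracted` in place; B performs the same in-place reverse, and the equivalence
-- proved here is about the return value.

-- ===== PORT A =====
def levenshtein_distance (s1 s2 : List String) : Int :=
  let m := s1.length
  let n := s2.length
  let dp : List (List Int) := (List.range (m + 1)).map (fun _ => List.replicate (n + 1) (0 : Int))
  let dp := (List.range (m + 1)).foldl (fun dp i => dp.set i ((dp.getD i []).set 0 (i : Int))) dp
  let dp := (List.range (n + 1)).foldl (fun dp j => dp.set 0 ((dp.getD 0 []).set j (j : Int))) dp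
  let dp := (List.range m).foldl (fun dp i0 =>
      (List.range n).foldl (fun dp j0 =>
        let cost : Int := if s1.getD i0 "" = s2.getD j0 "" then 0 else 1
        dp.set (i0 + 1) ((dp.getD (i0 + 1) []).set (j0 + 1)
          (min (min ((dp.getD i0 []).getD (j0 + 1) 0 + 1)
                    ((dp.getD (i0 + 1) []).getD j0 0 + 1))
               ((dp.getD i0 []).getD j0 0 + cost)))) dp) dp
  (dp.getD m []).getD n 0

def get_all_distances (extracted : List (String × String)) : List (List Int) :=
  let ex := extracted.reverse
  (List.range ex.length).foldl (fun distances i =>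
    distances ++ [(List.range ex.length).foldl (fun ds j =>
      if i ≠ j then
        ds ++ [levenshtein_distance (((PySem.Str.split? (ex.getD i ("", "")).2 " ").getD []))
                                    (((PySem.Str.split? (ex.getD j ("", "")).2 " ").getD []))]
      else
        ds ++ [(0 : Int)]) []]) []

-- ===== PORT B =====
-- Source B's inner `d(i, j)`: top-down memoized recursion; the closure-mutated `memo` dict is
-- threaded through in Python's evaluation order; fuel i + j + 1 covers the recursion depth.
def pvDLev (a b : List String) : Nat → Nat → Nat → PySem.Dict (Nat × Nat) Int → Int × PySem.Dict (Nat × Nat) Int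
  | 0, _, _, memo => (0, memo)
  | fuel + 1, i, j, memo =>
    match memo.get? (i, j) with
    | some v => (v, memo)
    | none =>
      if i = 0 then ((j : Int), memo.insert (i, j) (j : Int))
      else if j = 0 then ((i : Int), memo.insert (i, j) (i : Int))
      else
        let cost : Int := if a.getD (i - 1) "" = b.getD (j - 1) "" then 0 else 1
        let p1 := pvDLev a b fuel (i - 1) j memo
        let p2 := pvDLev a b fuel i (j - 1) p1.2
        let p3 := pvDLev a b fuel (i - 1) (j - 1) p2.2
        let r := min (min (p1.1 + 1) (p2.1 + 1)) (p3.1 + cost)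
        (r, p3.2.insert (i, j) r)

-- Source B's `_lev(a, b)`: fresh memo, evaluate d(len(a), len(b))
def pvLevB (a b : List String) : Int :=
  (pvDLev a b (a.length + b.length + 1) a.length b.length PySem.Dict.empty).1

def get_all_distances_alt (extracted : List (String × String)) : List (List Int) :=
  let ex := extracted.reverse
  let words := ex.map (fun e => (PySem.Str.split? e.2 " ").getD [])
  let n := words.length
  let tri := (List.range n).map (fun i =>
    (List.range' (i + 1) (n - (i + 1))).map (fun j => pvLevB (words.getD i []) (words.getD j [])))
  (List.range n).map (fun i => (List.range n).map (fun j =>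
    if i = j then (0 : Int)
    else if i < j then (tri.getD i []).getD (j - i - 1) 0
    else (tri.getD j []).getD (i - j - 1) 0))

-- ===== PRECONDITION & SPEC =====
def Spec_get_all_distances (extracted : List (String × String)) (out : List (List Int)) : Prop := out = get_all_distances_alt extracted
instance (extracted : List (String × String)) (out : List (List Int)) : Decidable (Spec_get_all_distances extracted out) := by unfold Spec_get_all_distances; infer_instance

-- ===== CLAIM (what is proved, stated in full; the proofs are below) =====
def Claim_equal_get_all_distances : Prop := ∀ (extracted : List (String × String)), Dom_get_all_distances extracted → Spec_get_all_distances extracted (get_all_distances extracted)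

-- ===== LEMMAS AND PROOFS =====

-- the mathematical Levenshtein recurrence on prefix lengths; both ports are proved equal to it
def pvLev (a b : List String) : Nat → Nat → Int
  | 0, j => (j : Int)
  | i + 1, 0 => ((i + 1 : Nat) : Int)
  | i + 1, j + 1 =>
      min (min (pvLev a b i (j + 1) + 1) (pvLev a b (i + 1) j + 1))
          (pvLev a b i j + (if a.getD i "" = b.getD j "" then 0 else 1))

theorem pvLev_zero_left (a b : List String) (j : Nat) : pvLev a b 0 j = (j : Int) := by
  rw [pvLev]

theorem pvLev_succ_zero (a b : List String) (i : Nat) : pvLev a b (i + 1) 0 = ((i + 1 : Nat) : Int) := by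
  rw [pvLev]

theorem pvLev_succ_succ (a b : List String) (i j : Nat) :
    pvLev a b (i + 1) (j + 1)
      = min (min (pvLev a b i (j + 1) + 1) (pvLev a b (i + 1) j + 1))
          (pvLev a b i j + (if a.getD i "" = b.getD j "" then 0 else 1)) := by
  rw [pvLev]

-- basic list indexing/set helpers
theorem pv_getD_append {α : Type} (l : List α) (a : α) (r : List α) (d : α) :
    (l ++ a :: r).getD l.length d = a := by
  simp [List.getD]

theorem pv_getD_append2 {α : Type} (l : List α) (a b : α) (r : List α) (d : α) :
    (l ++ a :: b :: r).getD (l.length + 1) d = b := by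
  have h : (l ++ [a]).length = l.length + 1 := by simp
  have := pv_getD_append (l ++ [a]) b r d
  rw [h, List.append_assoc] at this
  exact this

theorem pv_set_append {α : Type} (l : List α) (a : α) (r : List α) (b : α) :
    (l ++ a :: r).set l.length b = l ++ b :: r := by
  simp

theorem pv_set_append2 {α : Type} (l : List α) (a b : α) (r : List α) (c : α) :
    (l ++ a :: b :: r).set (l.length + 1) c = l ++ a :: c :: r := by
  have h : (l ++ [a]).length = l.length + 1 := by simp
  have := pv_set_append (l ++ [a]) b r c
  rw [h, List.append_assoc, List.append_assoc] at this
  exact this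

theorem pv_getD_map {α β : Type} (f : α → β) (l : List α) (i : Nat) (d : α) (e : β)
    (h : i < l.length) : (l.map f).getD i e = f (l.getD i d) := by
  simp [List.getD, h]

theorem pv_map_const {α β : Type} (l : List α) (c : β) :
    l.map (fun _ => c) = List.replicate l.length c := by
  induction l with
  | nil => rfl
  | cons x xs ih => simp [List.replicate, ih]

-- ===== A-side: the table DP computes pvLev =====

-- inner row recursion abstracted from A's j-fold (proof-layer view of A's loop)
def pvRowStep (x : String) : List String → List Int → Int → List Int
  | y :: ys, diag :: up :: ps, last =>
      let v := min (min (up + 1) (last + 1)) (diag + (if x = y then 0 else 1))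
      v :: pvRowStep x ys (up :: ps) v
  | _, _, _ => []

-- first init loop: dp[i][0] = i
theorem pv_init1 (n : Nat) : ∀ (t k : Nat) (done : List (List Int)), done.length = k →
    (List.range' k t).foldl (fun dp i => dp.set i ((dp.getD i []).set 0 (i : Int)))
        (done ++ List.replicate t (List.replicate (n + 1) (0 : Int)))
      = done ++ (List.range' k t).map (fun (i : Nat) => (i : Int) :: List.replicate n (0 : Int)) := by
  intro t
  induction t with
  | zero => intro k done _; simp
  | succ t ih =>
      intro k done hd
      rw [List.range'_succ, List.replicate_succ]
      simp only [List.foldl_cons]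
      rw [show (done ++ List.replicate (n+1) (0:Int) :: List.replicate t (List.replicate (n+1) (0:Int))).getD k []
            = List.replicate (n+1) (0:Int) from by rw [← hd]; exact pv_getD_append _ _ _ _]
      rw [show (done ++ List.replicate (n+1) (0:Int) :: List.replicate t (List.replicate (n+1) (0:Int))).set k
              ((List.replicate (n+1) (0:Int)).set 0 (k : Int))
            = done ++ ((List.replicate (n+1) (0:Int)).set 0 (k : Int)) :: List.replicate t (List.replicate (n+1) (0:Int)) from by
          rw [← hd]; exact pv_set_append _ _ _ _]
      have hset : (List.replicate (n+1) (0:Int)).set 0 (k : Int) = (k : Int) :: List.replicate n (0:Int) := by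
        simp [List.replicate_succ]
      rw [hset]
      have := ih (k+1) (done ++ [(k : Int) :: List.replicate n (0:Int)]) (by simp [hd])
      simpa [List.append_assoc] using this

-- second init loop body on a single row: row[j] = j
theorem pv_init2row : ∀ (t k : Nat) (c : List Int), c.length = k →
    (List.range' k t).foldl (fun r j => r.set j (j : Int)) (c ++ List.replicate t (0 : Int))
      = c ++ (List.range' k t).map (fun (j : Nat) => (j : Int)) := by
  intro t
  induction t with
  | zero => intro k c _; simp
  | succ t ih =>
      intro k c hc
      rw [List.range'_succ, List.replicate_succ]
      simp only [List.foldl_cons]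
      rw [show (c ++ (0:Int) :: List.replicate t (0:Int)).set k (k : Int)
            = c ++ (k : Int) :: List.replicate t (0:Int) from by rw [← hc]; exact pv_set_append _ _ _ _]
      have := ih (k+1) (c ++ [(k : Int)]) (by simp [hc])
      simpa [List.append_assoc] using this

-- second init loop only touches row 0
theorem pv_head_only (js : List Nat) : ∀ (r : List Int) (rest : List (List Int)),
    js.foldl (fun dp j => dp.set 0 ((dp.getD 0 []).set j (j : Int))) (r :: rest)
      = (js.foldl (fun r j => r.set j (j : Int)) r) :: rest := by
  induction js with
  | nil => intro r rest; rfl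
  | cons j js ih => intro r rest; simp only [List.foldl_cons, List.getD, List.getElem?_cons_zero,
      Option.getD_some, List.set_cons_zero]; exact ih _ _

-- the inner j-fold on the row level, related to pvRowStep
theorem pv_rowfold (x : String) (b : List String) (prev : List Int) :
    ∀ (bs bd : List String), b = bd ++ bs →
    ∀ (ps pd : List Int), prev = pd ++ ps → ps.length = bs.length + 1 → pd.length = bd.length →
    ∀ (c0 : List Int) (last : Int), c0.length = bd.length →
    (List.range' bd.length bs.length).foldl
        (fun curr j0 => curr.set (j0 + 1)
          (min (min (prev.getD (j0 + 1) 0 + 1) (curr.getD j0 0 + 1))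
               (prev.getD j0 0 + (if x = b.getD j0 "" then 0 else 1))))
        ((c0 ++ [last]) ++ List.replicate bs.length (0 : Int))
      = (c0 ++ [last]) ++ pvRowStep x bs ps last := by
  intro bs
  induction bs with
  | nil =>
      intro bd hb ps pd hp hps hpd c0 last hc
      simp [pvRowStep]
  | cons y ys ih =>
      intro bd hb ps pd hp hps hpd c0 last hc
      match ps, hps with
      | diag :: up :: ps', hps =>
        simp only [List.length_cons]
        rw [List.range'_succ, List.replicate_succ]
        simp only [List.foldl_cons]
        have hlen : (c0 ++ [last]).length = bd.length + 1 := by simp [hc]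
        have hget_last : ((c0 ++ [last]) ++ (0:Int) :: List.replicate ys.length (0:Int)).getD bd.length 0 = last := by
          rw [← hc, List.append_assoc]
          exact pv_getD_append c0 last ((0:Int) :: List.replicate ys.length (0:Int)) 0
        have hget_diag : prev.getD bd.length 0 = diag := by
          rw [hp, ← hpd]; exact pv_getD_append _ _ _ _
        have hget_up : prev.getD (bd.length + 1) 0 = up := by
          rw [hp, ← hpd]; exact pv_getD_append2 _ _ _ _ _
        have hget_y : b.getD bd.length "" = y := by
          rw [hb]; exact pv_getD_append _ _ _ _
        have hset : ((c0 ++ [last]) ++ (0:Int) :: List.replicate ys.length (0:Int)).set (bd.length + 1)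
              (min (min (up + 1) (last + 1)) (diag + (if x = y then 0 else 1)))
            = (c0 ++ [last]) ++ (min (min (up + 1) (last + 1)) (diag + (if x = y then 0 else 1))) :: List.replicate ys.length (0:Int) := by
          rw [← hlen]; exact pv_set_append _ _ _ _
        rw [hget_y, hget_diag, hget_up, hget_last, hset]
        have ihx := ih (bd ++ [y]) (by simp [hb]) (up :: ps') (pd ++ [diag])
          (by simp [hp]) (by simpa using hps) (by simp [hpd])
          (c0 ++ [last]) (min (min (up + 1) (last + 1)) (diag + (if x = y then 0 else 1))) (by simp [hc])
        simp only [List.length_append, List.length_cons, List.length_nil] at ihx ⊢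
        simpa [pvRowStep, List.append_assoc] using ihx

-- matrix-level inner fold: only row i0+1 changes, reading rows i0 and i0+1
theorem pv_matrix_inner (s1 s2 : List String) (i0 : Nat) (js : List Nat)
    (pre post : List (List Int)) (prev : List Int) (hpre : pre.length = i0) :
    ∀ curr : List Int,
    js.foldl (fun dp j0 =>
        dp.set (i0 + 1) ((dp.getD (i0 + 1) []).set (j0 + 1)
          (min (min ((dp.getD i0 []).getD (j0 + 1) 0 + 1)
                    ((dp.getD (i0 + 1) []).getD j0 0 + 1))
               ((dp.getD i0 []).getD j0 0 + (if s1.getD i0 "" = s2.getD j0 "" then 0 else 1))))) (pre ++ prev :: curr :: post)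
      = pre ++ prev :: (js.foldl (fun curr j0 => curr.set (j0 + 1)
          (min (min (prev.getD (j0 + 1) 0 + 1) (curr.getD j0 0 + 1))
               (prev.getD j0 0 + (if s1.getD i0 "" = s2.getD j0 "" then 0 else 1)))) curr) :: post := by
  induction js with
  | nil => intro curr; rfl
  | cons j js ih =>
      intro curr
      simp only [List.foldl_cons]
      have h1 : (pre ++ prev :: curr :: post).getD i0 [] = prev := by
        rw [← hpre]; exact pv_getD_append _ _ _ _
      have h2 : (pre ++ prev :: curr :: post).getD (i0 + 1) [] = curr := by
        rw [← hpre]; exact pv_getD_append2 _ _ _ _ _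
      have h3 : ∀ c : List Int, (pre ++ prev :: curr :: post).set (i0 + 1) c = pre ++ prev :: c :: post := by
        intro c; rw [← hpre]; exact pv_set_append2 _ _ _ _ _
      rw [h1, h2, h3]
      exact ih _

-- length of a rolling-row step
theorem pvRowStep_length (x : String) : ∀ (bs : List String) (ps : List Int) (last : Int),
    ps.length = bs.length + 1 → (pvRowStep x bs ps last).length = bs.length := by
  intro bs
  induction bs with
  | nil => intro ps last _; simp [pvRowStep]
  | cons y ys ih =>
      intro ps last hps
      match ps, hps with
      | diag :: up :: ps', hps =>
          simp only [pvRowStep, List.length_cons]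
          rw [ih (up :: ps') _ (by simpa using hps)]

-- the sequence of computed rows
def pvRowsSeq (s1 s2 : List String) : List Int → Nat → Nat → List (List Int)
  | prev, _, 0 => [prev]
  | prev, k, t + 1 => prev ::
      pvRowsSeq s1 s2 (((k + 1 : Nat) : Int) :: pvRowStep (s1.getD k "") s2 prev ((k + 1 : Nat) : Int)) (k + 1) t

theorem pv_outer (s1 s2 : List String) :
    ∀ (t k : Nat) (pre : List (List Int)) (prev : List Int), pre.length = k → k + t = s1.length →
      prev.length = s2.length + 1 →
    (List.range' k t).foldl (fun dp i0 =>
        (List.range' 0 s2.length).foldl (fun dp j0 =>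
          dp.set (i0 + 1) ((dp.getD (i0 + 1) []).set (j0 + 1)
            (min (min ((dp.getD i0 []).getD (j0 + 1) 0 + 1)
                      ((dp.getD (i0 + 1) []).getD j0 0 + 1))
                 ((dp.getD i0 []).getD j0 0 + (if s1.getD i0 "" = s2.getD j0 "" then 0 else 1))))) dp)
        (pre ++ prev :: (List.range' (k + 1) t).map (fun (i : Nat) => (i : Int) :: List.replicate s2.length (0 : Int)))
      = pre ++ pvRowsSeq s1 s2 prev k t := by
  intro t
  induction t with
  | zero => intro k pre prev hpre _ _; simp [pvRowsSeq]
  | succ t ih =>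
      intro k pre prev hpre hkt hprev
      rw [show List.range' k (t + 1) = k :: List.range' (k + 1) t from List.range'_succ]
      rw [show List.range' (k + 1) (t + 1) = (k + 1) :: List.range' (k + 2) t from List.range'_succ]
      simp only [List.map_cons, List.foldl_cons]
      rw [pv_matrix_inner s1 s2 k (List.range' 0 s2.length) pre _ prev hpre]
      have hrow := pv_rowfold (s1.getD k "") s2 prev s2 [] rfl prev [] rfl
        (by omega) rfl [] ((k + 1 : Nat) : Int) rfl
      simp only [List.length_nil, List.nil_append] at hrow
      have hcurinit : ((k + 1 : Nat) : Int) :: List.replicate s2.length (0 : Int)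
          = [((k + 1 : Nat) : Int)] ++ List.replicate s2.length (0 : Int) := rfl
      rw [hcurinit, hrow]
      have hnext_len : (((k + 1 : Nat) : Int) :: pvRowStep (s1.getD k "") s2 prev ((k + 1 : Nat) : Int)).length
          = s2.length + 1 := by
        simp [pvRowStep_length _ s2 prev _ hprev]
      have ihx := ih (k + 1) (pre ++ [prev])
        (((k + 1 : Nat) : Int) :: pvRowStep (s1.getD k "") s2 prev ((k + 1 : Nat) : Int))
        (by simp [hpre]) (by omega) hnext_len
      rw [show pvRowsSeq s1 s2 prev k (t + 1)
            = prev :: pvRowsSeq s1 s2 (((k + 1 : Nat) : Int) :: pvRowStep (s1.getD k "") s2 prev ((k + 1 : Nat) : Int)) (k + 1) t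
          from rfl]
      simpa [List.append_assoc] using ihx

-- a row step applied to the pvLev row i yields the pvLev row i+1
theorem pv_rowstep_lev (a b : List String) (i : Nat) :
    ∀ (bs bd : List String), b = bd ++ bs →
    pvRowStep (a.getD i "") bs ((List.range' bd.length (bs.length + 1)).map (fun j => pvLev a b i j))
        (pvLev a b (i + 1) bd.length)
      = (List.range' (bd.length + 1) bs.length).map (fun j => pvLev a b (i + 1) j) := by
  intro bs
  induction bs with
  | nil => intro bd hb; simp [pvRowStep]
  | cons y ys ih =>
      intro bd hb
      have hy : b.getD bd.length "" = y := by rw [hb]; exact pv_getD_append _ _ _ _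
      have hmapL : (List.range' bd.length ((y :: ys).length + 1)).map (fun j => pvLev a b i j)
          = pvLev a b i bd.length :: pvLev a b i (bd.length + 1)
              :: (List.range' (bd.length + 2) ys.length).map (fun j => pvLev a b i j) := by
        rw [show (y :: ys).length + 1 = ys.length + 1 + 1 from rfl]
        rw [List.range'_succ, List.map_cons, List.range'_succ, List.map_cons]
      have hmapR : (List.range' (bd.length + 1) (y :: ys).length).map (fun j => pvLev a b (i + 1) j)
          = pvLev a b (i + 1) (bd.length + 1)
              :: (List.range' (bd.length + 2) ys.length).map (fun j => pvLev a b (i + 1) j) := by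
        rw [show (y :: ys).length = ys.length + 1 from rfl]
        rw [List.range'_succ, List.map_cons]
      rw [hmapL, hmapR]
      simp only [pvRowStep]
      have hv : min (min (pvLev a b i (bd.length + 1) + 1) (pvLev a b (i + 1) bd.length + 1))
            (pvLev a b i bd.length + (if a.getD i "" = y then 0 else 1))
          = pvLev a b (i + 1) (bd.length + 1) := by
        rw [← hy, pvLev_succ_succ]
      rw [hv]
      congr 1
      have ihx := ih (bd ++ [y]) (by simp [hb])
      rw [show (bd ++ [y]).length = bd.length + 1 from by simp] at ihx
      rw [show (List.range' (bd.length + 1) (ys.length + 1)).map (fun j => pvLev a b i j)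
            = pvLev a b i (bd.length + 1) :: (List.range' (bd.length + 1 + 1) ys.length).map (fun j => pvLev a b i j) from by
          rw [List.range'_succ, List.map_cons]] at ihx
      rw [show bd.length + 1 + 1 = bd.length + 2 from rfl] at ihx
      exact ihx

-- row t of the row sequence is the pvLev row k+t
theorem pv_rows_lev (s1 s2 : List String) :
    ∀ (t k : Nat) (prev : List Int),
    prev = (List.range' 0 (s2.length + 1)).map (fun j => pvLev s1 s2 k j) →
    (pvRowsSeq s1 s2 prev k t).getD t []
      = (List.range' 0 (s2.length + 1)).map (fun j => pvLev s1 s2 (k + t) j) := by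
  intro t
  induction t with
  | zero => intro k prev hp; simpa [pvRowsSeq] using hp
  | succ t ih =>
      intro k prev hp
      rw [show pvRowsSeq s1 s2 prev k (t + 1)
            = prev :: pvRowsSeq s1 s2 (((k + 1 : Nat) : Int) :: pvRowStep (s1.getD k "") s2 prev ((k + 1 : Nat) : Int)) (k + 1) t
          from rfl]
      rw [show (prev :: pvRowsSeq s1 s2 (((k + 1 : Nat) : Int) :: pvRowStep (s1.getD k "") s2 prev ((k + 1 : Nat) : Int)) (k + 1) t).getD (t + 1) []
            = (pvRowsSeq s1 s2 (((k + 1 : Nat) : Int) :: pvRowStep (s1.getD k "") s2 prev ((k + 1 : Nat) : Int)) (k + 1) t).getD t []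
          from by simp [List.getD]]
      have hnext : ((k + 1 : Nat) : Int) :: pvRowStep (s1.getD k "") s2 prev ((k + 1 : Nat) : Int)
          = (List.range' 0 (s2.length + 1)).map (fun j => pvLev s1 s2 (k + 1) j) := by
        rw [show List.range' 0 (s2.length + 1) = 0 :: List.range' 1 s2.length from List.range'_succ]
        rw [List.map_cons]
        rw [hp]
        have h0 : pvLev s1 s2 (k + 1) 0 = ((k + 1 : Nat) : Int) := by simp [pvLev]
        have hstep := pv_rowstep_lev s1 s2 k s2 [] rfl
        simp only [List.length_nil, Nat.zero_add] at hstep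
        rw [show pvLev s1 s2 (k + 1) 0 = ((k + 1 : Nat) : Int) from h0] at hstep
        rw [hstep, h0]
      rw [hnext, ih (k + 1) _ rfl]
      rw [show k + (t + 1) = (k + 1) + t from by omega]

-- A's table DP computes pvLev
theorem pv_lev_eq (s1 s2 : List String) :
    levenshtein_distance s1 s2 = pvLev s1 s2 s1.length s2.length := by
  simp only [levenshtein_distance, List.range_eq_range']
  have h0 : (List.range' 0 (s1.length + 1)).map (fun _ => List.replicate (s2.length + 1) (0 : Int))
      = List.replicate (s1.length + 1) (List.replicate (s2.length + 1) (0 : Int)) := by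
    rw [pv_map_const]; simp
  rw [h0]
  have h1 := pv_init1 s2.length (s1.length + 1) 0 [] rfl
  simp only [List.nil_append] at h1
  rw [h1]
  rw [show List.range' 0 (s1.length + 1) = 0 :: List.range' 1 s1.length from List.range'_succ]
  simp only [List.map_cons, Nat.cast_zero]
  rw [show ((0 : Int) :: List.replicate s2.length (0 : Int)) = List.replicate (s2.length + 1) (0 : Int)
      from List.replicate_succ.symm]
  rw [pv_head_only]
  have h2row := pv_init2row (s2.length + 1) 0 [] rfl
  simp only [List.nil_append] at h2row
  rw [h2row]
  have h2 := pv_outer s1 s2 s1.length 0 []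
    ((List.range' 0 (s2.length + 1)).map (fun (j : Nat) => (j : Int))) rfl (by omega) (by simp)
  simp only [List.nil_append] at h2
  rw [h2]
  have hprev0 : (List.range' 0 (s2.length + 1)).map (fun (j : Nat) => (j : Int))
      = (List.range' 0 (s2.length + 1)).map (fun j => pvLev s1 s2 0 j) := by
    apply List.map_congr_left; intro j _; simp [pvLev]
  rw [hprev0, pv_rows_lev s1 s2 s1.length 0 _ rfl]
  rw [pv_getD_map _ _ s2.length 0 0 (by simp)]
  rw [show (List.range' 0 (s2.length + 1)).getD s2.length 0 = s2.length from by
    simp [List.getD]]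
  simp

-- ===== B-side: the memoized recursion computes pvLev =====

theorem pvDLev_correct (a b : List String) : ∀ (fuel i j : Nat) (memo : PySem.Dict (Nat × Nat) Int),
    i + j < fuel →
    (∀ p v, memo.get? p = some v → v = pvLev a b p.1 p.2) →
    (pvDLev a b fuel i j memo).1 = pvLev a b i j ∧
    (∀ p v, (pvDLev a b fuel i j memo).2.get? p = some v → v = pvLev a b p.1 p.2) := by
  intro fuel
  induction fuel with
  | zero => intro i j memo h _; omega
  | succ fuel ih =>
      intro i j memo hf hinv
      rcases hm : memo.get? (i, j) with _ | v
      · rcases i with _ | i'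
        · -- i = 0
          have hres : pvDLev a b (fuel + 1) 0 j memo = ((j : Int), memo.insert (0, j) (j : Int)) := by
            simp [pvDLev, hm]
          rw [hres]
          constructor
          · simp [pvLev]
          · intro p v hp
            rw [PySem.Dict.get?_insert] at hp
            split at hp
            · cases hp; rename_i hpk; subst hpk; simp [pvLev]
            · exact hinv p v hp
        · rcases j with _ | j'
          · -- j = 0
            have hres : pvDLev a b (fuel + 1) (i' + 1) 0 memo
                = (((i' + 1 : Nat) : Int), memo.insert (i' + 1, 0) ((i' + 1 : Nat) : Int)) := by
              simp [pvDLev, hm]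
            rw [hres]
            constructor
            · simp [pvLev]
            · intro p v hp
              rw [PySem.Dict.get?_insert] at hp
              split at hp
              · cases hp; rename_i hpk; subst hpk; simp [pvLev]
              · exact hinv p v hp
          · -- i = i'+1, j = j'+1
            have h1 := ih i' (j' + 1) memo (by omega) hinv
            have h2 := ih (i' + 1) j' (pvDLev a b fuel i' (j' + 1) memo).2 (by omega) h1.2
            have h3 := ih i' j' (pvDLev a b fuel (i' + 1) j' (pvDLev a b fuel i' (j' + 1) memo).2).2 (by omega) h2.2
            have hr : (pvDLev a b (fuel + 1) (i' + 1) (j' + 1) memo).1 = pvLev a b (i' + 1) (j' + 1) ∧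
                (pvDLev a b (fuel + 1) (i' + 1) (j' + 1) memo).2
                  = (pvDLev a b fuel i' j' (pvDLev a b fuel (i' + 1) j' (pvDLev a b fuel i' (j' + 1) memo).2).2).2.insert
                      (i' + 1, j' + 1) (pvLev a b (i' + 1) (j' + 1)) := by
              simp only [pvDLev, hm, Nat.succ_ne_zero, if_false, Nat.add_sub_cancel]
              rw [h1.1, h2.1, h3.1, pvLev_succ_succ]
              exact ⟨rfl, rfl⟩
            refine ⟨hr.1, ?_⟩
            intro p v hp
            rw [hr.2, PySem.Dict.get?_insert] at hp
            split at hp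
            · cases hp; rename_i hpk; subst hpk; rfl
            · exact h3.2 p v hp
      · -- hit
        have : (pvDLev a b (fuel + 1) i j memo) = (v, memo) := by simp [pvDLev, hm]
        rw [this]
        exact ⟨hinv (i, j) v hm, hinv⟩

theorem pvLevB_eq (a b : List String) : pvLevB a b = pvLev a b a.length b.length := by
  have := pvDLev_correct a b (a.length + b.length + 1) a.length b.length PySem.Dict.empty
    (by omega) (by intro p v hp; rw [PySem.Dict.get?_empty] at hp; cases hp)
  exact this.1

-- symmetry of the recurrence (justifies B's mirrored triangle lookup)
theorem pvLev_symm (a b : List String) : ∀ (N i j : Nat), i + j ≤ N →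
    pvLev a b i j = pvLev b a j i := by
  intro N
  induction N with
  | zero =>
      intro i j h
      have hi : i = 0 := by omega
      have hj : j = 0 := by omega
      subst hi; subst hj; rw [pvLev_zero_left, pvLev_zero_left]
  | succ N ih =>
      intro i j h
      rcases i with _ | i' <;> rcases j with _ | j'
      · rw [pvLev_zero_left, pvLev_zero_left]
      · rw [pvLev_zero_left, pvLev_succ_zero]
      · rw [pvLev_succ_zero, pvLev_zero_left]
      · have e1 : pvLev a b i' (j' + 1) = pvLev b a (j' + 1) i' := ih i' (j' + 1) (by omega)
        have e2 : pvLev a b (i' + 1) j' = pvLev b a j' (i' + 1) := ih (i' + 1) j' (by omega)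
        have e3 : pvLev a b i' j' = pvLev b a j' i' := ih i' j' (by omega)
        rw [pvLev_succ_succ, pvLev_succ_succ]
        rw [e1, e2, e3]
        by_cases hc : a.getD i' "" = b.getD j' ""
        · have hc' : b.getD j' "" = a.getD i' "" := hc.symm
          rw [if_pos hc, if_pos hc']
          omega
        · have hc' : ¬ (b.getD j' "" = a.getD i' "") := fun e => hc e.symm
          rw [if_neg hc, if_neg hc']
          omega

-- A's inner fold with if/else, as a map
theorem pv_foldl_append_if {α : Type} (f : Nat → α) (c : α) (P : Nat → Prop) [DecidablePred P] :
    ∀ (js : List Nat) (acc : List α),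
    js.foldl (fun ds j => if P j then ds ++ [f j] else ds ++ [c]) acc
      = acc ++ js.map (fun j => if P j then f j else c) := by
  intro js
  induction js with
  | nil => intro acc; simp
  | cons j js ih => intro acc; by_cases h : P j <;> simp [h, ih, List.append_assoc]

-- ===== VERDICT (by name: the statement is the Claim_ definition above) =====
set_option maxHeartbeats 1000000 in
theorem get_all_distances_spec : Claim_equal_get_all_distances := by
  intro extracted _
  unfold Spec_get_all_distances
  simp only [get_all_distances, get_all_distances_alt, List.length_map]
  rw [PySem.List.foldl_append_singleton_eq_map]
  simp only [List.nil_append]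
  apply List.map_congr_left
  intro i hi
  rw [pv_foldl_append_if]
  simp only [List.nil_append]
  apply List.map_congr_left
  intro j hj
  rw [List.mem_range] at hi hj
  set ex := extracted.reverse with hex
  set N := ex.length with hN
  have hw : ∀ k, k < N → (ex.map (fun e => (PySem.Str.split? e.2 " ").getD [])).getD k []
      = (PySem.Str.split? (ex.getD k ("", "")).2 " ").getD [] := by
    intro k hk
    exact pv_getD_map (fun e => (PySem.Str.split? e.2 " ").getD []) ex k ("", "") [] hk
  have htri : ∀ p q, p < q → q < N →
      (((List.range N).map (fun i' =>
          (List.range' (i' + 1) (N - (i' + 1))).map (fun j' =>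
            pvLevB ((ex.map (fun e => (PySem.Str.split? e.2 " ").getD [])).getD i' [])
                   ((ex.map (fun e => (PySem.Str.split? e.2 " ").getD [])).getD j' [])))).getD p []).getD (q - p - 1) 0
        = pvLevB ((ex.map (fun e => (PySem.Str.split? e.2 " ").getD [])).getD p [])
                 ((ex.map (fun e => (PySem.Str.split? e.2 " ").getD [])).getD q []) := by
    intro p q hpq hqN
    rw [pv_getD_map _ (List.range N) p 0 [] (by simpa using lt_trans hpq hqN)]
    rw [show (List.range N).getD p 0 = p from by
      simp [List.getD, lt_trans hpq hqN]]
    rw [pv_getD_map _ (List.range' (p + 1) (N - (p + 1))) (q - p - 1) 0 0 (by simp; omega)]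
    rw [show (List.range' (p + 1) (N - (p + 1))).getD (q - p - 1) 0 = q from by
      have hlt : q - p - 1 < N - (p + 1) := by omega
      simp [List.getD, hlt]; omega]
  by_cases h : i = j
  · simp [h]
  · have hij : i ≠ j := h
    rw [if_pos hij, if_neg h]
    rcases Nat.lt_or_ge i j with hlt | hge
    · rw [if_pos hlt, htri i j hlt hj, hw i hi, hw j hj]
      rw [pvLevB_eq, pv_lev_eq]
    · have hgt : j < i := by omega
      rw [if_neg (by omega), htri j i hgt hi, hw i hi, hw j hj]
      rw [pvLevB_eq, pv_lev_eq]
      exact (pvLev_symm _ _ (((PySem.Str.split? (ex.getD j ("", "")).2 " ").getD []).length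
        + ((PySem.Str.split? (ex.getD i ("", "")).2 " ").getD []).length) _ _ (by omega)).symm
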